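-- pv_equiv track=rewrite | github.com/Mariama1001/PPC-Hannabis | game.py | cards_1player
-- ===== SOURCE A (Python) =====
-- def cards_1player(num_player):
--     cartes=[]
--     if num_player==1:
--
--         for i in range(1,4):
--             cartes.append(num_player * 1)
--         for i in range(1,3):
--             cartes.append(num_player * 2)
--             cartes.append(num_player * 3)
--             cartes.append(num_player * 4)
--         cartes.append(num_player * 5)
--
--     if num_player==2:
--
--         for i in range(1,4):
--             cartes.append(6)
--         for i in range(1,3):
--             cartes.append(7)
--             cartes.append(8)
--             cartes.append(9)
--         cartes.append(10)
--
--     if num_player==3: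
--
--         for i in range(1,4):
--             cartes.append(11)
--         for i in range(1,3):
--             cartes.append(12)
--             cartes.append(13)
--             cartes.append(14)
--         cartes.append(15)
--
--     if num_player==4:
--
--         for i in range(1,4):
--             cartes.append(16)
--         for i in range(1,3):
--             cartes.append(17)
--             cartes.append(18)
--             cartes.append(19)
--         cartes.append(20)
--
--     if num_player ==5:
--
--         for i in range(1,4):
--             cartes.append(21)
--         for i in range(1,3):
--             cartes.append(22)
--             cartes.append(23)
--             cartes.append(24)
--         cartes.append(25)
--
--
--
--     return cartes
-- ===== SOURCE B (Python) =====
-- def cards_1player(num_player):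
--     pattern = [1, 1, 1, 2, 3, 4, 2, 3, 4, 5]
--     if num_player == 1:
--         return [num_player * v for v in pattern]
--     for k in (2, 3, 4, 5):
--         if num_player == k:
--             return [5 * (k - 1) + v for v in pattern]
--     return []
-- ===== Notes on version B (the rewrite author's own statement) =====
-- stated objective: simpler
-- what changed: Replaces the copied per-player append blocks with one shared pattern list plus a per-player constant offset, found by scanning the candidate player numbers with an early return.
import Mathlib
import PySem

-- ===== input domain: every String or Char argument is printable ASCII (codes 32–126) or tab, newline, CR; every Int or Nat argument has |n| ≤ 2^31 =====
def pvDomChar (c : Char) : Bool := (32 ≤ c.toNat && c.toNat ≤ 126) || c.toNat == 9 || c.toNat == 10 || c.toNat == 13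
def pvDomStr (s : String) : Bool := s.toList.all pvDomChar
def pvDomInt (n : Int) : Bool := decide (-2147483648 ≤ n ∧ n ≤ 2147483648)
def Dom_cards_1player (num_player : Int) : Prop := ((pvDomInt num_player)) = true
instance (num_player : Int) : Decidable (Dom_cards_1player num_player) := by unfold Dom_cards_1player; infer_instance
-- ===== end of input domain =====

-- B replaces A's five duplicated append blocks with one shared pattern list plus a 5*(k-1) offset: simpler.


-- ===== PORT A =====
def cards_1player (num_player : Int) : List Int :=
  let cartes : List Int := []
  let cartes := if num_player == 1 then
      let cartes := (PySem.List.pyRange 1 4 1).foldl (fun c _ => c ++ [num_player * 1]) cartes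
      let cartes := (PySem.List.pyRange 1 3 1).foldl
        (fun c _ => c ++ [num_player * 2] ++ [num_player * 3] ++ [num_player * 4]) cartes
      cartes ++ [num_player * 5]
    else cartes
  let cartes := if num_player == 2 then
      let cartes := (PySem.List.pyRange 1 4 1).foldl (fun c _ => c ++ [6]) cartes
      let cartes := (PySem.List.pyRange 1 3 1).foldl (fun c _ => c ++ [7] ++ [8] ++ [9]) cartes
      cartes ++ [10]
    else cartes
  let cartes := if num_player == 3 then
      let cartes := (PySem.List.pyRange 1 4 1).foldl (fun c _ => c ++ [11]) cartes
      let cartes := (PySem.List.pyRange 1 3 1).foldl (fun c _ => c ++ [12] ++ [13] ++ [14]) cartes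
      cartes ++ [15]
    else cartes
  let cartes := if num_player == 4 then
      let cartes := (PySem.List.pyRange 1 4 1).foldl (fun c _ => c ++ [16]) cartes
      let cartes := (PySem.List.pyRange 1 3 1).foldl (fun c _ => c ++ [17] ++ [18] ++ [19]) cartes
      cartes ++ [20]
    else cartes
  let cartes := if num_player == 5 then
      let cartes := (PySem.List.pyRange 1 4 1).foldl (fun c _ => c ++ [21]) cartes
      let cartes := (PySem.List.pyRange 1 3 1).foldl (fun c _ => c ++ [22] ++ [23] ++ [24]) cartes
      cartes ++ [25]
    else cartes
  cartes

-- ===== PORT B =====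
def cards_1player_alt (num_player : Int) : List Int :=
  let pattern : List Int := [1, 1, 1, 2, 3, 4, 2, 3, 4, 5]
  if num_player == 1 then
    pattern.map (fun v => num_player * v)
  else
    match ([2, 3, 4, 5] : List Int).find? (fun k => num_player == k) with
    | some k => pattern.map (fun v => 5 * (k - 1) + v)
    | none => []

-- ===== PRECONDITION & SPEC =====
def Spec_cards_1player (num_player : Int) (out : List Int) : Prop := out = cards_1player_alt num_player
instance (num_player : Int) (out : List Int) : Decidable (Spec_cards_1player num_player out) := by unfold Spec_cards_1player; infer_instance

-- ===== CLAIM (what is proved, stated in full; the proofs are below) =====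
def Claim_equal_cards_1player : Prop := ∀ (num_player : Int), Dom_cards_1player num_player → Spec_cards_1player num_player (cards_1player num_player)

-- ===== LEMMAS AND PROOFS =====

-- ===== VERDICT (by name: the statement is the Claim_ definition above) =====
theorem cards_1player_spec : Claim_equal_cards_1player := by
  intro n _
  unfold Spec_cards_1player
  by_cases h1 : n = 1; · subst h1; decide
  by_cases h2 : n = 2; · subst h2; decide
  by_cases h3 : n = 3; · subst h3; decide
  by_cases h4 : n = 4; · subst h4; decide
  by_cases h5 : n = 5; · subst h5; decide
  simp [cards_1player, cards_1player_alt, List.find?, h1,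
    show (n == 2) = false from by simp [h2], show (n == 3) = false from by simp [h3],
    show (n == 4) = false from by simp [h4], show (n == 5) = false from by simp [h5]]
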